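-- pv_equiv track=rewrite | github.com/hyowonsong/Algorithm1 | 프로그래머스/2/131701. 연속 부분 수열 합의 개수/연속 부분 수열 합의 개수.py | solution
-- ===== SOURCE A (Python) =====
-- def solution(elements):
--     answer = 0
--     cycle = elements + elements  # 리스트를 두 번 이어붙여 주기적인 패턴을 만듦
--     # [7,9,1,1,4,7,9,1,1,4]
--     s = set()  # 중복된 합을 방지하기 위한 집합(set)을 초기화
--
--     for i in range(len(elements)):  # 리스트의 각 원소에 대해 반복
--         for j in range(len(elements)):  # 리스트의 각 원소에 대해 반복
--             s.add(sum(cycle[i:i+j]))  # 현재 위치에서부터 j개의 원소를 선택한 부분 수열의 합을 집합에 추가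
--
--     return len(s)  # 중복을 제외한 부분 수열 합의 개수를 반환
-- ===== SOURCE B (Python) =====
-- def solution(elements):
--     n = len(elements)
--     # running prefix sums of the doubled list, built iteratively
--     pre = [0]
--     acc = 0
--     for x in elements + elements:
--         acc += x
--         pre.append(acc)
--     # every window sum as a flat comprehension, then deduplicate once
--     sums = [pre[i + j] - pre[i] for i in range(n) for j in range(n)]
--     return len(set(sums))
-- ===== Notes on version B (the rewrite author's own statement) =====
-- stated objective: faster
-- what changed: Replaces A's per-window sum(cycle[i:i+j]) recomputation and incremental set-adds with an iteratively built prefix-sum array, a flat list of O(1) window-sum differences, and one final deduplication via set().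
import Mathlib
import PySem

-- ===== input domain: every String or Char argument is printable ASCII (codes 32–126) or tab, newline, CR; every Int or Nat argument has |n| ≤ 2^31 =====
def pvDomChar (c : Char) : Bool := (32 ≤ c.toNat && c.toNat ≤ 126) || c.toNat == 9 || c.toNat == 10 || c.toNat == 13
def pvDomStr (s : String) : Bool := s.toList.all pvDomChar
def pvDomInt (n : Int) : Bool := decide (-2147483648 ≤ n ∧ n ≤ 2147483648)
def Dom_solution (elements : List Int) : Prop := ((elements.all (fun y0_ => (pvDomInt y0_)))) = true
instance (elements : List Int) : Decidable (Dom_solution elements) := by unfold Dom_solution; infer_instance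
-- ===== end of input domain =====

-- B replaces A's per-window sum(cycle[i:i+j]) recomputation by an iteratively built
-- prefix-sum array, a flat list of window-sum differences, and a single final dedup (faster).

-- ===== PORT A =====
def solution (elements : List Int) : Int :=
  let cycle := elements ++ elements
  let s : PySem.Set Int :=
    (PySem.List.pyRange 0 (elements.length : Int) 1).foldl (fun s i =>
      (PySem.List.pyRange 0 (elements.length : Int) 1).foldl (fun s j =>
        PySem.Set.add s ((PySem.List.slice cycle (some i) (some (i + j))).sum)) s)
      PySem.Set.empty
  PySem.Set.len s

-- ===== PORT B =====
def solution_alt (elements : List Int) : Int :=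
  let n : Int := (elements.length : Int)
  -- pre = [0]; acc = 0; for x in …: acc += x; pre.append(acc)
  let pa := (elements ++ elements).foldl
    (fun (pa : List Int × Int) x => (pa.1 ++ [pa.2 + x], pa.2 + x)) ([0], 0)
  let pre := pa.1
  -- flat comprehension of all window sums (i outer, j inner)
  let sums := (PySem.List.pyRange 0 n 1).flatMap (fun i =>
    (PySem.List.pyRange 0 n 1).map (fun j =>
      PySem.List.pyGetD pre (i + j) 0 - PySem.List.pyGetD pre i 0))
  PySem.Set.len (PySem.Set.ofList sums)

-- ===== PRECONDITION & SPEC =====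
def Spec_solution (elements : List Int) (out : Int) : Prop := out = solution_alt elements
instance (elements : List Int) (out : Int) : Decidable (Spec_solution elements out) := by unfold Spec_solution; infer_instance

-- ===== CLAIM (what is proved, stated in full; the proofs are below) =====
def Claim_equal_solution : Prop := ∀ (elements : List Int), Dom_solution elements → Spec_solution elements (solution elements)

-- ===== LEMMAS AND PROOFS =====

-- reference prefix-sum list used only in proofs
def prefs (acc : Int) : List Int → List Int
  | [] => [acc]
  | x :: xs => acc :: prefs (acc + x) xs

lemma prefs_head_tail (acc : Int) (L : List Int) :
    prefs acc L = acc :: (prefs acc L).tail := by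
  cases L <;> simp [prefs]

lemma foldl_pre_eq (L : List Int) (p : List Int) (a : Int) :
    L.foldl (fun (pa : List Int × Int) x => (pa.1 ++ [pa.2 + x], pa.2 + x)) (p, a)
      = (p ++ (prefs a L).tail, a + L.sum) := by
  induction L generalizing p a with
  | nil => simp [prefs]
  | cons x xs ih =>
    simp only [List.foldl_cons, ih, prefs, List.tail_cons, List.append_assoc,
      List.singleton_append, List.sum_cons]
    rw [prefs_head_tail (a + x) xs]
    simp
    ring

lemma pre_eq (L : List Int) :
    (L.foldl (fun (pa : List Int × Int) x => (pa.1 ++ [pa.2 + x], pa.2 + x)) ([0], 0)).1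
      = prefs 0 L := by
  rw [foldl_pre_eq]
  cases L <;> simp [prefs]

lemma prefs_getD (L : List Int) (acc : Int) (k : Nat) (hk : k ≤ L.length) :
    (prefs acc L).getD k 0 = acc + (L.take k).sum := by
  induction L generalizing acc k with
  | nil =>
    have : k = 0 := by simpa using hk
    subst this; simp [prefs]
  | cons x xs ih =>
    cases k with
    | zero => simp [prefs]
    | succ k =>
      simp only [prefs, List.getD_cons_succ, List.take_succ_cons, List.sum_cons]
      rw [ih (acc + x) k (by simpa using hk)]
      ring

-- the per-(i,j) value A adds equals the one B lists
lemma window_eq (e : List Int) (i j : Int)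
    (hi0 : 0 ≤ i) (hi : i < (e.length : Int)) (hj0 : 0 ≤ j) (hj : j < (e.length : Int)) :
    (PySem.List.slice (e ++ e) (some i) (some (i + j))).sum
      = PySem.List.pyGetD (prefs 0 (e ++ e)) (i + j) 0
        - PySem.List.pyGetD (prefs 0 (e ++ e)) i 0 := by
  obtain ⟨a, rfl⟩ : ∃ a : Nat, i = (a : Int) := ⟨i.toNat, (Int.toNat_of_nonneg hi0).symm⟩
  obtain ⟨b, rfl⟩ : ∃ b : Nat, j = (b : Int) := ⟨j.toNat, (Int.toNat_of_nonneg hj0).symm⟩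
  have ha : a < e.length := by exact_mod_cast hi
  have hb : b < e.length := by exact_mod_cast hj
  have hab : ((a : Int) + b) = ((a + b : Nat) : Int) := by push_cast; ring
  rw [hab, PySem.List.pyGetD_natCast, PySem.List.pyGetD_natCast,
      PySem.List.slice_toNat (e ++ e) (by positivity) (by positivity)]
  rw [prefs_getD _ _ _ (by simp; omega), prefs_getD _ _ _ (by simp; omega)]
  simp only [Int.toNat_natCast]
  rw [List.take_add, List.sum_append]
  have : (a + b) - a = b := by omega
  rw [this]
  ring

-- folding Set.add over a flatMap = the nested fold
lemma foldl_add_flatMap {α : Type} (l : List α) (f : α → List Int) (s : PySem.Set Int) :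
    (l.flatMap f).foldl PySem.Set.add s
      = l.foldl (fun s i => (f i).foldl PySem.Set.add s) s := by
  induction l generalizing s with
  | nil => rfl
  | cons x xs ih => simp [List.flatMap_cons, List.foldl_append, ih]

theorem sets_eq (elements : List Int) :
    solution elements = solution_alt elements := by
  unfold solution solution_alt
  dsimp only
  rw [pre_eq, PySem.Set.ofList_eq_foldl, foldl_add_flatMap]
  congr 1
  apply PySem.List.foldl_congr_mem
  intro acc i hi
  rw [List.foldl_map]
  apply PySem.List.foldl_congr_mem
  intro acc' j hj
  rw [PySem.List.mem_pyRange_one] at hi hj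
  rw [window_eq elements i j hi.1 hi.2 hj.1 hj.2]

-- ===== VERDICT (by name: the statement is the Claim_ definition above) =====
theorem solution_spec : Claim_equal_solution := by
  intro elements _
  unfold Spec_solution
  exact sets_eq elements
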